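-- pv_equiv track=rewrite | github.com/AndersKallberg/PROTAC_splitter | notebooks/data_curation_augmentation_splitting_functions.py | get_cluster_substructure_attachment_counts
-- ===== SOURCE A (Python) =====
-- from collections import defaultdict
--
-- def get_cluster_substructure_attachment_counts(augmented_protac_substructureindices_list):
--     # protacs is a list of tuples, where each tuple contains 3 elements (for POI, linker, E3)
--     # Each element is a tuple itself, containing indices for cluster, substructure, and attachment point
--
--     # Initialize structures to count occurrences
--     cluster_counts = defaultdict(lambda: defaultdict(int))
--     substructure_counts = defaultdict(lambda: defaultdict(int))
--     attachment_point_counts = defaultdict(lambda: defaultdict(int))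
--
--     # Process protacs to fill the structures
--     for protac in augmented_protac_substructureindices_list:
--         for idx, substructure_type in enumerate(["POI", "Linker", "E3"]):
--             cluster_idx, substructure_idx, attachment_point_idx = protac[idx]
--
--             # Count occurrences
--             cluster_counts[substructure_type][(cluster_idx,)] += 1
--             substructure_counts[substructure_type][(cluster_idx, substructure_idx)] += 1
--             attachment_point_counts[substructure_type][(cluster_idx, substructure_idx, attachment_point_idx)] += 1
--
--     return cluster_counts, substructure_counts, attachment_point_counts
-- ===== SOURCE B (Python) =====
-- from collections import defaultdict
--
-- def get_cluster_substructure_attachment_counts(augmented_protac_substructureindices_list):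
--     # Single counting pass over one attachment-point table; cluster- and
--     # substructure-level tables are derived afterwards by aggregating it.
--     attachment_point_counts = defaultdict(lambda: defaultdict(int))
--     for protac in augmented_protac_substructureindices_list:
--         for sub, substructure_type in zip(protac, ("POI", "Linker", "E3")):
--             cluster_idx, substructure_idx, attachment_point_idx = sub
--             attachment_point_counts[substructure_type][(cluster_idx, substructure_idx, attachment_point_idx)] += 1
--
--     def _agg(table, n):
--         out = defaultdict(int)
--         for key, cnt in table.items():
--             out[key[:n]] += cnt
--         return out
--
--     cluster_counts = defaultdict(lambda: defaultdict(int))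
--     substructure_counts = defaultdict(lambda: defaultdict(int))
--     for substructure_type, table in attachment_point_counts.items():
--         cluster_counts[substructure_type] = _agg(table, 1)
--         substructure_counts[substructure_type] = _agg(table, 2)
--
--     return cluster_counts, substructure_counts, attachment_point_counts
-- ===== Notes on version B (the rewrite author's own statement) =====
-- stated objective: alternative
-- what changed: B increments only the attachment-point table in the main loop and then derives the substructure and cluster tables by aggregating that table's entries under truncated keys, instead of A's three parallel nested-defaultdict increments per event.
import Mathlib
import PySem

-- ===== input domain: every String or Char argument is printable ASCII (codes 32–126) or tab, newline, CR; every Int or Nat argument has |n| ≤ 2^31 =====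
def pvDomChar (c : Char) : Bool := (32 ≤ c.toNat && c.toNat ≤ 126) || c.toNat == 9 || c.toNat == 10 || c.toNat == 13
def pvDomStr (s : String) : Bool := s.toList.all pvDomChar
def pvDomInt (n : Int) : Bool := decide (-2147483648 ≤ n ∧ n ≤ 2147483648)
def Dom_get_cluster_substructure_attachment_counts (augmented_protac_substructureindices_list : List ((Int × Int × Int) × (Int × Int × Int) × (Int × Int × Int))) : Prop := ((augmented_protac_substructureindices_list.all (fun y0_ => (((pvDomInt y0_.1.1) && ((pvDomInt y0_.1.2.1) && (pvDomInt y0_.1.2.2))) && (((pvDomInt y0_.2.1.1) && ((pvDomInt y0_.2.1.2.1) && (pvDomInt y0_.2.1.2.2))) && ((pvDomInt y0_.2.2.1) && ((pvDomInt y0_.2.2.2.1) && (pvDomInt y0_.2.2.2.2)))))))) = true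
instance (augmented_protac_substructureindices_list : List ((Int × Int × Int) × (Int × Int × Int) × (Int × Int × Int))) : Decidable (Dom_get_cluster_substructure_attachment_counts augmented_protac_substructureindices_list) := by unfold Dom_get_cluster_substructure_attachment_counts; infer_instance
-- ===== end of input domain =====

-- B differs from A by one counting pass plus aggregation instead of three parallel counters (objective: alternative; return values proved equal).
-- ===== PORT A =====
-- the three (indices, substructure-type) slots of one protac, shared by both ports
def pvEvents (protac : (Int × Int × Int) × (Int × Int × Int) × (Int × Int × Int)) :
    List ((Int × Int × Int) × String) :=
  [(protac.1, "POI"), (protac.2.1, "Linker"), (protac.2.2, "E3")]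

def pvStepA1
    (st : PySem.Dict String (PySem.Dict (List Int) Int) × PySem.Dict String (PySem.Dict (List Int) Int) × PySem.Dict String (PySem.Dict (List Int) Int))
    (ev : (Int × Int × Int) × String) :
    PySem.Dict String (PySem.Dict (List Int) Int) × PySem.Dict String (PySem.Dict (List Int) Int) × PySem.Dict String (PySem.Dict (List Int) Int) :=
  (st.1.modify ev.2 PySem.Dict.empty (fun d => d.modify [ev.1.1] 0 (· + 1)),
   st.2.1.modify ev.2 PySem.Dict.empty (fun d => d.modify [ev.1.1, ev.1.2.1] 0 (· + 1)),
   st.2.2.modify ev.2 PySem.Dict.empty (fun d => d.modify [ev.1.1, ev.1.2.1, ev.1.2.2] 0 (· + 1)))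

def get_cluster_substructure_attachment_counts (augmented_protac_substructureindices_list : List ((Int × Int × Int) × (Int × Int × Int) × (Int × Int × Int))) : (List (String × List (List Int × Int))) × (List (String × List (List Int × Int))) × (List (String × List (List Int × Int))) :=
  let st := augmented_protac_substructureindices_list.foldl
    (fun st protac => (pvEvents protac).foldl pvStepA1 st)
    (PySem.Dict.empty, PySem.Dict.empty, PySem.Dict.empty)
  (st.1.items.map (fun p => (p.1, p.2.items)),
   st.2.1.items.map (fun p => (p.1, p.2.items)),
   st.2.2.items.map (fun p => (p.1, p.2.items)))

-- ===== PORT B =====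
-- B: one counting pass into the attachment-point table only, then aggregate it

def pvStepB (ac : PySem.Dict String (PySem.Dict (List Int) Int))
    (ev : (Int × Int × Int) × String) : PySem.Dict String (PySem.Dict (List Int) Int) :=
  ac.modify ev.2 PySem.Dict.empty (fun d => d.modify [ev.1.1, ev.1.2.1, ev.1.2.2] 0 (· + 1))

-- _agg(table, n): sum the counts of `table` into keys truncated to length n
def pvAgg (n : Nat) (table : PySem.Dict (List Int) Int) : PySem.Dict (List Int) Int :=
  table.items.foldl (fun out p => out.modify (p.1.take n) 0 (· + p.2)) PySem.Dict.empty

def get_cluster_substructure_attachment_counts_alt (augmented_protac_substructureindices_list : List ((Int × Int × Int) × (Int × Int × Int) × (Int × Int × Int))) : (List (String × List (List Int × Int))) × (List (String × List (List Int × Int))) × (List (String × List (List Int × Int))) :=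
  let ac := augmented_protac_substructureindices_list.foldl
    (fun ac protac => (pvEvents protac).foldl pvStepB ac) PySem.Dict.empty
  (ac.items.map (fun p => (p.1, (pvAgg 1 p.2).items)),
   ac.items.map (fun p => (p.1, (pvAgg 2 p.2).items)),
   ac.items.map (fun p => (p.1, p.2.items)))

-- ===== PRECONDITION & SPEC =====
def Spec_get_cluster_substructure_attachment_counts (augmented_protac_substructureindices_list : List ((Int × Int × Int) × (Int × Int × Int) × (Int × Int × Int))) (out : (List (String × List (List Int × Int))) × (List (String × List (List Int × Int))) × (List (String × List (List Int × Int)))) : Prop := out = get_cluster_substructure_attachment_counts_alt augmented_protac_substructureindices_list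
instance (augmented_protac_substructureindices_list : List ((Int × Int × Int) × (Int × Int × Int) × (Int × Int × Int))) (out : (List (String × List (List Int × Int))) × (List (String × List (List Int × Int))) × (List (String × List (List Int × Int)))) : Decidable (Spec_get_cluster_substructure_attachment_counts augmented_protac_substructureindices_list out) := by
  unfold Spec_get_cluster_substructure_attachment_counts
  have h1 : DecidableEq (List (String × List (List Int × Int))) := inferInstance
  have h2 : DecidableEq (List (String × List (List Int × Int)) × List (String × List (List Int × Int))) := @instDecidableEqProd _ _ h1 h1
  exact @instDecidableEqProd _ _ h1 h2 _ _

-- ===== CLAIM (what is proved, stated in full; the proofs are below) =====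
def Claim_equal_get_cluster_substructure_attachment_counts : Prop := ∀ (augmented_protac_substructureindices_list : List ((Int × Int × Int) × (Int × Int × Int) × (Int × Int × Int))), Dom_get_cluster_substructure_attachment_counts augmented_protac_substructureindices_list → Spec_get_cluster_substructure_attachment_counts augmented_protac_substructureindices_list (get_cluster_substructure_attachment_counts augmented_protac_substructureindices_list)

-- ===== LEMMAS AND PROOFS =====

lemma pv_modify_eq_insert {κ ν : Type} [BEq κ] (d : PySem.Dict κ ν) (k : κ) (d0 : ν) (f : ν → ν) :
    d.modify k d0 f = d.insert k (f (d.getD k d0)) := by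
  simp [PySem.Dict.modify]

-- value of the aggregation fold at any key: the sum of the counts in its group
lemma pv_agg_fold_getD (n : Nat) (l : List (List Int × Int)) (d : PySem.Dict (List Int) Int) (q : List Int) :
    (l.foldl (fun out p => out.modify (p.1.take n) 0 (· + p.2)) d).getD q 0
      = d.getD q 0 + ((l.filter (fun p => p.1.take n == q)).map (·.2)).sum := by
  induction l generalizing d with
  | nil => simp
  | cons p l ih =>
      simp only [List.foldl_cons, ih, List.filter_cons]
      by_cases h : p.1.take n = q
      · simp [h]
        ring
      · rw [PySem.Dict.getD_modify]
        simp [h, Ne.symm h]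

lemma pv_agg_keys (n : Nat) (table : PySem.Dict (List Int) Int) :
    (pvAgg n table).keys = PySem.Set.ofList (table.items.map (fun p => p.1.take n)) := by
  unfold pvAgg
  rw [PySem.Dict.keys_foldl_modify_key table.items (fun p => p.1.take n) 0 (fun _ p v => v + p.2)]
  simp [PySem.Set.update_nil_left, PySem.Dict.keys_empty]

lemma pv_agg_nodup (n : Nat) (table : PySem.Dict (List Int) Int) :
    (pvAgg n table).keys.Nodup := by
  unfold pvAgg
  exact PySem.Dict.nodup_keys_foldl_modify_key table.items (fun p => p.1.take n) 0 (fun _ p v => v + p.2) _ (by simp)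

lemma pv_agg_getD (n : Nat) (table : PySem.Dict (List Int) Int) (q : List Int) :
    (pvAgg n table).getD q 0
      = ((table.items.filter (fun p => p.1.take n == q)).map (·.2)).sum := by
  unfold pvAgg
  rw [pv_agg_fold_getD]
  simp

-- replacing the (unique) entry at key k by its successor shifts exactly one group sum by 1
lemma pv_sum_replace (n : Nat) (l : List (List Int × Int)) (k : List Int) (v : Int)
    (hnd : (l.map (·.1)).Nodup) (hmem : (k, v) ∈ l) (q : List Int) :
    (((l.map (fun p => if p.1 == k then (k, v + 1) else p)).filter (fun p => p.1.take n == q)).map (·.2)).sum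
      = ((l.filter (fun p => p.1.take n == q)).map (·.2)).sum + (if k.take n == q then 1 else 0) := by
  induction l with
  | nil => simp at hmem
  | cons a l ih =>
      simp only [List.map_cons, List.nodup_cons, List.mem_map] at hnd
      rcases List.mem_cons.mp hmem with h | h
      · subst h
        have hrepl : l.map (fun p => if p.1 == k then (k, v + 1) else p) = l := by
          calc l.map (fun p => if p.1 == k then (k, v + 1) else p) = l.map id := by
                apply List.map_congr_left
                intro p hp
                have hpk : p.1 ≠ k := fun hk => hnd.1 ⟨p, hp, hk⟩
                simp [hpk]
            _ = l := List.map_id l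
        simp only [List.map_cons, hrepl, beq_self_eq_true, if_true, List.filter_cons]
        by_cases hq : k.take n = q
        · simp only [hq, beq_self_eq_true, if_true, List.map_cons, List.sum_cons]
          ring
        · have hq' : (k.take n == q) = false := by simp [hq]
          simp [hq']
      · have hak : a.1 ≠ k := fun hk => hnd.1 ⟨(k, v), h, by rw [hk]⟩
        have hak' : (a.1 == k) = false := by simp [hak]
        have ihh := ih hnd.2 h
        simp only [List.map_cons, hak', Bool.false_eq_true, if_false, List.filter_cons]
        by_cases hq : a.1.take n = q
        · have hq' : (a.1.take n == q) = true := by simp [hq]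
          simp only [hq', if_true, List.map_cons, List.sum_cons, ihh]
          ring
        · have hq' : (a.1.take n == q) = false := by simp [hq]
          simp only [hq', Bool.false_eq_true, if_false, ihh]

-- key lemma: aggregation commutes with a single increment of the attachment table
lemma pv_agg_modify (n : Nat) (table : PySem.Dict (List Int) Int) (hnd : table.keys.Nodup) (k : List Int) :
    pvAgg n (table.modify k 0 (· + 1)) = (pvAgg n table).modify (k.take n) 0 (· + 1) := by
  rw [pv_modify_eq_insert table, pv_modify_eq_insert (pvAgg n table)]
  by_cases h : table.contains k = true
  · -- k already present: the items list is rewritten in place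
    obtain ⟨v, hv⟩ : ∃ v, table.get? k = some v := by
      have := PySem.Dict.contains_eq_isSome_get? table k
      rw [h] at this
      exact Option.isSome_iff_exists.mp this.symm
    have hgv : table.getD k 0 = v := PySem.Dict.getD_of_get?_eq_some table 0 hv
    have hmem : (k, v) ∈ table.items := PySem.Dict.mem_items_of_get?_eq_some table hv
    rw [hgv]
    have hitems : (table.insert k (v + 1)).items
        = table.items.map (fun p => if p.1 == k then (k, v + 1) else p) :=
      PySem.Dict.items_insert_of_contains table (v + 1) h
    have hkc : (pvAgg n table).contains (k.take n) = true := by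
      rw [PySem.Dict.contains_iff_mem_keys, pv_agg_keys, PySem.Set.mem_ofList]
      exact List.mem_map.mpr ⟨(k, v), hmem, by simp⟩
    have hkeysL : (pvAgg n (table.insert k (v + 1))).keys = (pvAgg n table).keys := by
      rw [pv_agg_keys, pv_agg_keys, hitems]
      congr 1
      rw [List.map_map]
      apply List.map_congr_left
      intro p hp
      by_cases hpk : p.1 = k
      · simp [hpk]
      · simp [hpk]
    have hkeysR : ((pvAgg n table).insert (k.take n) ((pvAgg n table).getD (k.take n) 0 + 1)).keys
        = (pvAgg n table).keys := PySem.Dict.keys_insert_of_contains _ _ hkc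
    have hval : ∀ q, (pvAgg n (table.insert k (v + 1))).getD q 0
        = ((pvAgg n table).insert (k.take n) ((pvAgg n table).getD (k.take n) 0 + 1)).getD q 0 := by
      intro q
      rw [pv_agg_getD, PySem.Dict.getD_insert, hitems]
      rw [pv_sum_replace n table.items k v hnd hmem q]
      by_cases hq : k.take n = q
      · subst hq
        simp [pv_agg_getD]
      · have hq' : (k.take n == q) = false := by simp [hq]
        simp only [hq', Bool.false_eq_true, if_false, add_zero, if_neg (Ne.symm hq)]
        rw [pv_agg_getD]
    apply PySem.Dict.ext
    rw [PySem.Dict.items_eq_map_keys _ (by rw [hkeysL]; exact pv_agg_nodup n table) 0,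
        PySem.Dict.items_eq_map_keys _ (by rw [hkeysR]; exact pv_agg_nodup n table) 0,
        hkeysL, hkeysR]
    apply List.map_congr_left
    intro q _
    rw [hval q]
  · -- k is new: the entry (k, 1) is appended and aggregated by one extra fold step
    have h' : table.contains k = false := by
      cases hc : table.contains k
      · rfl
      · exact absurd hc h
    have hg : table.getD k 0 = 0 := PySem.Dict.getD_of_not_contains table 0 h'
    have hitems : (table.insert k (table.getD k 0 + 1)).items = table.items ++ [(k, table.getD k 0 + 1)] :=
      PySem.Dict.items_insert_of_not_contains table _ h'
    unfold pvAgg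
    rw [hitems, List.foldl_append]
    simp only [List.foldl_cons, List.foldl_nil, pv_modify_eq_insert]
    rw [hg]
    norm_num

lemma pv_keys_eq (n : Nat) (cc ac : PySem.Dict String (PySem.Dict (List Int) Int))
    (hcc : cc.items = ac.items.map (fun p => (p.1, pvAgg n p.2))) : cc.keys = ac.keys := by
  show cc.items.map (·.1) = ac.items.map (·.1)
  rw [hcc, List.map_map]
  rfl

-- outer-dict step: a derived counter follows one increment of the attachment table
lemma pv_outer (n : Nat) (cc ac : PySem.Dict String (PySem.Dict (List Int) Int))
    (hnd : ac.keys.Nodup) (hin : ∀ p ∈ ac.items, p.2.keys.Nodup)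
    (hcc : cc.items = ac.items.map (fun p => (p.1, pvAgg n p.2))) (t : String) (k : List Int) :
    (cc.modify t PySem.Dict.empty (fun d => d.modify (k.take n) 0 (· + 1))).items
      = (ac.modify t PySem.Dict.empty (fun d => d.modify k 0 (· + 1))).items.map (fun p => (p.1, pvAgg n p.2)) := by
  rw [pv_modify_eq_insert cc, pv_modify_eq_insert ac]
  have hkeys : cc.keys = ac.keys := pv_keys_eq n cc ac hcc
  have hcont : cc.contains t = ac.contains t := by
    rw [PySem.Dict.contains_eq_decide_mem_keys, PySem.Dict.contains_eq_decide_mem_keys, hkeys]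
  by_cases h : ac.contains t = true
  · -- t already a key of both outer dicts
    obtain ⟨v, hv⟩ : ∃ v, ac.get? t = some v := by
      have := PySem.Dict.contains_eq_isSome_get? ac t
      rw [h] at this
      exact Option.isSome_iff_exists.mp this.symm
    have hgv : ac.getD t PySem.Dict.empty = v := PySem.Dict.getD_of_get?_eq_some ac _ hv
    have hmem : (t, v) ∈ ac.items := PySem.Dict.mem_items_of_get?_eq_some ac hv
    have hgc : cc.getD t PySem.Dict.empty = pvAgg n v := by
      have hmem' : (t, pvAgg n v) ∈ cc.items := by
        rw [hcc]
        exact List.mem_map.mpr ⟨(t, v), hmem, rfl⟩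
      exact PySem.Dict.getD_of_mem_items cc hmem' (by rw [pv_keys_eq n cc ac hcc]; exact hnd) PySem.Dict.empty
    rw [PySem.Dict.items_insert_of_contains cc _ (by rw [hcont]; exact h),
        PySem.Dict.items_insert_of_contains ac _ h, hcc, List.map_map, List.map_map]
    apply List.map_congr_left
    rintro ⟨p1, p2⟩ hp
    by_cases hpt : p1 = t
    · subst hpt
      have hpv : p2 = v := by
        have hg2 := PySem.Dict.get?_of_mem_items ac hp hnd
        rw [hv] at hg2
        exact (Option.some_inj.mp hg2).symm
      subst hpv
      simp only [Function.comp_apply, beq_self_eq_true, if_true, hgc, hgv]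
      rw [pv_agg_modify n p2 (hin _ hp) k]
    · simp [hpt]
  · -- t is new in both outer dicts
    have h' : ac.contains t = false := by
      cases hc : ac.contains t
      · rfl
      · exact absurd hc h
    have hc' : cc.contains t = false := by rw [hcont]; exact h'
    rw [PySem.Dict.items_insert_of_not_contains cc _ hc',
        PySem.Dict.items_insert_of_not_contains ac _ h', List.map_append, hcc,
        PySem.Dict.getD_of_not_contains cc _ hc', PySem.Dict.getD_of_not_contains ac _ h']
    have he : pvAgg n PySem.Dict.empty = PySem.Dict.empty := rfl
    have hx : pvAgg n (PySem.Dict.empty.modify k 0 (· + 1)) = PySem.Dict.empty.modify (k.take n) 0 (· + 1) := by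
      rw [pv_agg_modify n PySem.Dict.empty (by simp) k, he]
    simp [hx]

def pvINV (cc sc ac : PySem.Dict String (PySem.Dict (List Int) Int)) : Prop :=
  ac.keys.Nodup ∧ (∀ p ∈ ac.items, p.2.keys.Nodup) ∧
  cc.items = ac.items.map (fun p => (p.1, pvAgg 1 p.2)) ∧
  sc.items = ac.items.map (fun p => (p.1, pvAgg 2 p.2))

lemma pv_getD_nodup (ac : PySem.Dict String (PySem.Dict (List Int) Int))
    (hin : ∀ p ∈ ac.items, p.2.keys.Nodup) (t : String) :
    (ac.getD t PySem.Dict.empty).keys.Nodup := by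
  by_cases h : ac.contains t = true
  · obtain ⟨v, hv⟩ : ∃ v, ac.get? t = some v := by
      have := PySem.Dict.contains_eq_isSome_get? ac t
      rw [h] at this
      exact Option.isSome_iff_exists.mp this.symm
    rw [PySem.Dict.getD_of_get?_eq_some ac _ hv]
    exact hin (t, v) (PySem.Dict.mem_items_of_get?_eq_some ac hv)
  · have h' : ac.contains t = false := by
      cases hc : ac.contains t
      · rfl
      · exact absurd hc h
    rw [PySem.Dict.getD_of_not_contains ac _ h']
    simp

lemma pv_step1 (cc sc ac : PySem.Dict String (PySem.Dict (List Int) Int)) (h : pvINV cc sc ac)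
    (ev : (Int × Int × Int) × String) :
    pvINV (pvStepA1 (cc, sc, ac) ev).1 (pvStepA1 (cc, sc, ac) ev).2.1 (pvStepA1 (cc, sc, ac) ev).2.2
      ∧ (pvStepA1 (cc, sc, ac) ev).2.2 = pvStepB ac ev := by
  obtain ⟨hnd, hin, hcc, hsc⟩ := h
  refine ⟨⟨?_, ?_, ?_, ?_⟩, rfl⟩
  · show (ac.modify ev.2 PySem.Dict.empty (fun d => d.modify [ev.1.1, ev.1.2.1, ev.1.2.2] 0 (· + 1))).keys.Nodup
    rw [pv_modify_eq_insert]
    exact PySem.Dict.nodup_keys_insert _ _ _ hnd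
  · rintro ⟨p1, p2⟩ hp
    simp only [pvStepA1] at hp
    rw [pv_modify_eq_insert] at hp
    rcases (PySem.Dict.mem_items_insert _ _ _ _).mp hp with hh | hh
    · have hp2 : p2 = (ac.getD ev.2 PySem.Dict.empty).modify [ev.1.1, ev.1.2.1, ev.1.2.2] 0 (· + 1) :=
        congrArg Prod.snd hh
      rw [hp2, pv_modify_eq_insert]
      exact PySem.Dict.nodup_keys_insert _ _ _ (pv_getD_nodup ac hin ev.2)
    · exact hin _ hh.1
  · exact pv_outer 1 cc ac hnd hin hcc ev.2 [ev.1.1, ev.1.2.1, ev.1.2.2]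
  · exact pv_outer 2 sc ac hnd hin hsc ev.2 [ev.1.1, ev.1.2.1, ev.1.2.2]

lemma pv_step3 (pr : (Int × Int × Int) × (Int × Int × Int) × (Int × Int × Int))
    (cc sc ac : PySem.Dict String (PySem.Dict (List Int) Int)) (h : pvINV cc sc ac) :
    pvINV ((pvEvents pr).foldl pvStepA1 (cc, sc, ac)).1
          ((pvEvents pr).foldl pvStepA1 (cc, sc, ac)).2.1
          ((pvEvents pr).foldl pvStepA1 (cc, sc, ac)).2.2
      ∧ ((pvEvents pr).foldl pvStepA1 (cc, sc, ac)).2.2 = (pvEvents pr).foldl pvStepB ac := by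
  simp only [pvEvents, pvEvents, List.foldl_cons, List.foldl_nil]
  obtain ⟨h1, e1⟩ := pv_step1 cc sc ac h (pr.1, "POI")
  obtain ⟨h2, e2⟩ := pv_step1 _ _ _ h1 (pr.2.1, "Linker")
  obtain ⟨h3, e3⟩ := pv_step1 _ _ _ h2 (pr.2.2, "E3")
  rw [e1] at e2 h3 e3
  rw [e2] at h3 e3
  exact ⟨h3, e3⟩

lemma pv_loop (l : List ((Int × Int × Int) × (Int × Int × Int) × (Int × Int × Int)))
    (cc sc ac : PySem.Dict String (PySem.Dict (List Int) Int)) (h : pvINV cc sc ac) :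
    pvINV (l.foldl (fun st protac => (pvEvents protac).foldl pvStepA1 st) (cc, sc, ac)).1
          (l.foldl (fun st protac => (pvEvents protac).foldl pvStepA1 st) (cc, sc, ac)).2.1
          (l.foldl (fun st protac => (pvEvents protac).foldl pvStepA1 st) (cc, sc, ac)).2.2
      ∧ (l.foldl (fun st protac => (pvEvents protac).foldl pvStepA1 st) (cc, sc, ac)).2.2
          = l.foldl (fun ac protac => (pvEvents protac).foldl pvStepB ac) ac := by
  induction l generalizing cc sc ac with
  | nil => exact ⟨h, rfl⟩
  | cons pr l ih =>
      simp only [List.foldl_cons]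
      obtain ⟨h1, e1⟩ := pv_step3 pr cc sc ac h
      obtain ⟨h2, e2⟩ := ih _ _ _ h1
      rw [e1] at e2
      exact ⟨h2, e2⟩

-- ===== VERDICT (by name: the statement is the Claim_ definition above) =====
theorem get_cluster_substructure_attachment_counts_spec : Claim_equal_get_cluster_substructure_attachment_counts := by
  intro l _
  unfold Spec_get_cluster_substructure_attachment_counts
  unfold get_cluster_substructure_attachment_counts get_cluster_substructure_attachment_counts_alt
  have h0 : pvINV PySem.Dict.empty PySem.Dict.empty PySem.Dict.empty := by
    refine ⟨by simp, ?_, rfl, rfl⟩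
    intro p hp
    rw [show (PySem.Dict.empty : PySem.Dict String (PySem.Dict (List Int) Int)).items = [] from rfl] at hp
    cases hp
  obtain ⟨⟨_, _, hcc, hsc⟩, hac⟩ := pv_loop l PySem.Dict.empty PySem.Dict.empty PySem.Dict.empty h0
  simp only [hcc, hsc, hac, List.map_map]
  rfl
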